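-- pv_equiv track=rewrite | github.com/rrigato/docparser | docparser/docparser.py | get_doc_line_locations
-- ===== SOURCE A (Python) =====
-- def get_doc_line_locations(markdown_content):
--     """Gets the doc string line locations for inserting new documentation
--
--         Parameters
--         ----------
--         markdown_content : str
--             content of the markdown file
--
--         Returns
--         -------
--         yaml_start_line : str
--             Where to begin inserting data type information for the
--             azure pipelines yaml
--
--         parameters_start_line : str
--             where the parameters section begins in the markdown task definition
--
--         Raises
--         ------
--     """
--     line_counter = 0
--     yaml_start_line = None
--     parameters_start_line = None
--
--     for markdown_file_line in markdown_content.splitlines():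
--
--         '''
--             want to start before this Description markdown section
--             ## Description<a name="description"></a>
--
--         '''
--         if markdown_file_line.lower().startswith("## description<a"):
--             yaml_start_line = line_counter - 1
--
--         '''
--             parameters section begins after this markdown header
--             ## Parameters<a name="parameters"></a>
--         '''
--         if markdown_file_line.lower().startswith("## parameters<a"):
--             parameters_start_line = line_counter + 1
--
--         line_counter += 1
--
--     return(yaml_start_line, parameters_start_line)
-- ===== SOURCE B (Python) =====
-- def _last_match(lines, prefix):
--     """Index of the last line whose lowercase form starts with prefix, else None."""
--     for i in range(len(lines) - 1, -1, -1):
--         if lines[i].lower().startswith(prefix):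
--             return i
--     return None
--
--
-- def get_doc_line_locations(markdown_content):
--     lines = markdown_content.splitlines()
--     y = _last_match(lines, "## description<a")
--     p = _last_match(lines, "## parameters<a")
--     return (y - 1 if y is not None else None,
--             p + 1 if p is not None else None)
-- ===== Notes on version B (the rewrite author's own statement) =====
-- stated objective: simpler
-- what changed: Replaces the single counting loop that overwrites two accumulators with two independent backward scans that each return the last matching header index directly.
import Mathlib
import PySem

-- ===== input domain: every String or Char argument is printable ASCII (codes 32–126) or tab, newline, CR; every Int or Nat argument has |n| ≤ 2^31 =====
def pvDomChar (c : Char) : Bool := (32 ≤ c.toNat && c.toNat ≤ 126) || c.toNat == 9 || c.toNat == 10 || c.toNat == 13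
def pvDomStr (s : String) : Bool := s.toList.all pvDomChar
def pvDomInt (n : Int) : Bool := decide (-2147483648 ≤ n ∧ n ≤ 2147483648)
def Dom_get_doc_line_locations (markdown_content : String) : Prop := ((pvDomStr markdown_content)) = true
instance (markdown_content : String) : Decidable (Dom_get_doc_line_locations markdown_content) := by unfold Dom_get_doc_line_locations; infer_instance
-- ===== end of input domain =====

-- B replaces A's one counting loop (two overwriting accumulators) by two independent
-- backward scans that each return the last matching header index directly (objective: simpler).

-- ===== PORT A =====
-- one forward loop with a counter, overwriting both accumulators on each match
def get_doc_line_locations (markdown_content : String) : Option Int × Option Int :=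
  let step : (Int × Option Int × Option Int) → String → (Int × Option Int × Option Int) :=
    fun st line =>
      let c := st.1
      let y := if PySem.Str.startswith (PySem.Str.lower line) "## description<a"
               then some (c - 1) else st.2.1
      let p := if PySem.Str.startswith (PySem.Str.lower line) "## parameters<a"
               then some (c + 1) else st.2.2
      (c + 1, y, p)
  let r := (PySem.Str.splitlines markdown_content).foldl step (0, none, none)
  (r.2.1, r.2.2)

-- ===== PORT B =====
-- _last_match: scan indices from len-1 down to 0, return first (i.e. last) match
def pvLastMatch (pfx : String) (lines : List String) : Nat → Option Int
  | 0 => none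
  | i + 1 =>
      if PySem.Str.startswith (PySem.Str.lower (lines.getD i "")) pfx
      then some (i : Int)
      else pvLastMatch pfx lines i

def get_doc_line_locations_alt (markdown_content : String) : Option Int × Option Int :=
  let lines := PySem.Str.splitlines markdown_content
  let y := pvLastMatch "## description<a" lines lines.length
  let p := pvLastMatch "## parameters<a" lines lines.length
  (y.map (· - 1), p.map (· + 1))

-- ===== PRECONDITION & SPEC =====
def Spec_get_doc_line_locations (markdown_content : String) (out : Option Int × Option Int) : Prop := out = get_doc_line_locations_alt markdown_content
instance (markdown_content : String) (out : Option Int × Option Int) : Decidable (Spec_get_doc_line_locations markdown_content out) := by unfold Spec_get_doc_line_locations; infer_instance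

-- ===== CLAIM (what is proved, stated in full; the proofs are below) =====
def Claim_equal_get_doc_line_locations : Prop := ∀ (markdown_content : String), Dom_get_doc_line_locations markdown_content → Spec_get_doc_line_locations markdown_content (get_doc_line_locations markdown_content)

-- ===== LEMMAS AND PROOFS =====

-- pvLastMatch only inspects indices below its bound, so a snoc-extension is invisible
theorem pvLastMatch_append (pfx : String) (l : List String) (x : String) :
    ∀ i, i ≤ l.length → pvLastMatch pfx (l ++ [x]) i = pvLastMatch pfx l i := by
  intro i
  induction i with
  | zero => intro _; rfl
  | succ i ih =>
      intro h
      have hi : i < l.length := Nat.lt_of_succ_le h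
      simp only [pvLastMatch, List.getD_append _ _ _ _ hi, ih (Nat.le_of_lt hi)]

-- A's fold computes exactly the two last-match indices, shifted by ∓1
theorem foldA_eq (l : List String) :
    l.foldl
      (fun st line =>
        let c := st.1
        let y := if PySem.Str.startswith (PySem.Str.lower line) "## description<a"
                 then some (c - 1) else st.2.1
        let p := if PySem.Str.startswith (PySem.Str.lower line) "## parameters<a"
                 then some (c + 1) else st.2.2
        (c + 1, y, p))
      ((0 : Int), (none : Option Int), (none : Option Int))
    = ((l.length : Int),
       (pvLastMatch "## description<a" l l.length).map (· - 1),
       (pvLastMatch "## parameters<a" l l.length).map (· + 1)) := by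
  induction l using List.reverseRecOn with
  | nil => rfl
  | append_singleton l x ih =>
      rw [List.foldl_append, ih]
      simp only [List.foldl_cons, List.foldl_nil, List.length_append, List.length_cons,
        List.length_nil, Nat.zero_add]
      have hx : (l ++ [x]).getD l.length "" = x := by simp
      clear ih
      refine Prod.ext (by push_cast; ring) (Prod.ext ?_ ?_) <;>
      · simp only [pvLastMatch, hx, pvLastMatch_append _ l x _ le_rfl]
        split <;> rfl

theorem get_doc_line_locations_spec : Claim_equal_get_doc_line_locations := by
  intro md _
  show _ = _
  simp only [get_doc_line_locations, get_doc_line_locations_alt, foldA_eq]
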